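-- pv_equiv track=rewrite | github.com/EstevanRamos/Data_structures | Ramos_Estevan_Lab7.py | knapsack_backtracking
-- ===== SOURCE A (Python) =====
-- def knapsack_backtracking(W,D,v,w):
--     if W < 0:
--         return False
--     if D < 0:
--         return True
--
--     if not v or not w:
--         return False
--
--     return knapsack_backtracking(W-w[0],D-v[0],v[1:],w[1:]) or knapsack_backtracking(W,D,v[1:],w[1:])
-- ===== SOURCE B (Python) =====
-- def knapsack_backtracking(W, D, v, w):
--     # Iterative depth-first search with an explicit stack of (remaining W,
--     # remaining D, next index) states; indexes into the zipped item list
--     # instead of recursing on list slices.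
--     items = list(zip(w, v))
--     n = len(items)
--     stack = [(W, D, 0)]
--     while stack:
--         a, b, i = stack.pop()
--         if a < 0:
--             continue
--         if b < 0:
--             return True
--         if i == n:
--             continue
--         wi, vi = items[i]
--         stack.append((a, b, i + 1))            # skip item i (explored second)
--         stack.append((a - wi, b - vi, i + 1))  # take item i (explored first)
--     return False
-- ===== Notes on version B (the rewrite author's own statement) =====
-- stated objective: alternative
-- what changed: Replaced A's branching recursion on list slices by an iterative depth-first search with an explicit stack of (remaining W, remaining D, next index) states over the zipped item list, indexing instead of copying slices.
import Mathlib
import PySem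

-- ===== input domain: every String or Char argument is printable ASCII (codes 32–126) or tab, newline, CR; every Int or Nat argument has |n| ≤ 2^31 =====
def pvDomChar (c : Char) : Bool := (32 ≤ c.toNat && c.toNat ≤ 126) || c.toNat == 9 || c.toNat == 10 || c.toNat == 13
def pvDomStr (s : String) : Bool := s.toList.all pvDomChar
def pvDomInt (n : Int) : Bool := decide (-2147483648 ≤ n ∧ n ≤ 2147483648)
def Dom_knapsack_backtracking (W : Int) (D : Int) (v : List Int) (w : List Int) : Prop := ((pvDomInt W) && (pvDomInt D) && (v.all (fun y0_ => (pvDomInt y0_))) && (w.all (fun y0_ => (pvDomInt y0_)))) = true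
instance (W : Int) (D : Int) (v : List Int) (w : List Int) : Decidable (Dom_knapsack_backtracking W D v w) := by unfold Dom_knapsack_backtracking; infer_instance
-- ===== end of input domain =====

-- B replaces A's branching recursion on list slices by an iterative depth-first
-- search with an explicit stack of (remaining W, remaining D, next index) states.

-- ===== PORT A =====
def knapsack_backtracking (W : Int) (D : Int) (v : List Int) (w : List Int) : Bool :=
  if W < 0 then false
  else if D < 0 then true
  else
    match v, w with
    | [], _ => false
    | _, [] => false
    | v0 :: vt, w0 :: wt =>
        knapsack_backtracking (W - w0) (D - v0) vt wt || knapsack_backtracking W D vt wt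
termination_by v.length

-- ===== PORT B =====
-- the 'while stack:' loop of Source B; the list head is the top of the stack,
-- 'true' is the early 'return True', falling out of the loop returns 'false'
def pvDfs (items : List (Int × Int)) : List (Int × Int × Nat) → Bool
  | [] => false
  | (a, b, i) :: rest =>
      if a < 0 then pvDfs items rest
      else if b < 0 then true
      else if h : i < items.length then
        pvDfs items ((a - items[i].1, b - items[i].2, i + 1) :: (a, b, i + 1) :: rest)
      else pvDfs items rest
termination_by stack => (stack.map (fun s => 3 ^ (items.length - s.2.2))).sum
decreasing_by
  · simp only [List.map_cons, List.sum_cons]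
    have : 0 < 3 ^ (items.length - i) := pow_pos (by norm_num : (0:ℕ) < 3) _
    omega
  · simp only [List.map_cons, List.sum_cons]
    have he : items.length - i = (items.length - (i + 1)) + 1 := by omega
    rw [he, pow_succ]
    have : 0 < 3 ^ (items.length - (i + 1)) := pow_pos (by norm_num : (0:ℕ) < 3) _
    omega
  · simp only [List.map_cons, List.sum_cons]
    have : 0 < 3 ^ (items.length - i) := pow_pos (by norm_num : (0:ℕ) < 3) _
    omega

def knapsack_backtracking_alt (W : Int) (D : Int) (v : List Int) (w : List Int) : Bool :=
  pvDfs (w.zip v) [(W, D, 0)]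

-- ===== PRECONDITION & SPEC =====
def Spec_knapsack_backtracking (W : Int) (D : Int) (v : List Int) (w : List Int) (out : Bool) : Prop := out = knapsack_backtracking_alt W D v w
instance (W : Int) (D : Int) (v : List Int) (w : List Int) (out : Bool) : Decidable (Spec_knapsack_backtracking W D v w out) := by unfold Spec_knapsack_backtracking; infer_instance

-- ===== CLAIM (what is proved, stated in full; the proofs are below) =====
def Claim_equal_knapsack_backtracking : Prop := ∀ (W : Int) (D : Int) (v : List Int) (w : List Int), Dom_knapsack_backtracking W D v w → Spec_knapsack_backtracking W D v w (knapsack_backtracking W D v w)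

-- ===== LEMMAS AND PROOFS =====

lemma A_neg_W {W D : Int} (v w : List Int) (h : W < 0) :
    knapsack_backtracking W D v w = false := by
  rw [knapsack_backtracking.eq_def]; simp [h]

lemma A_true {W D : Int} (v w : List Int) (hW : 0 ≤ W) (h : D < 0) :
    knapsack_backtracking W D v w = true := by
  rw [knapsack_backtracking.eq_def]; simp [h, not_lt.mpr hW]

lemma A_base {W D : Int} {v w : List Int} (hW : 0 ≤ W) (hD : 0 ≤ D)
    (h : v = [] ∨ w = []) : knapsack_backtracking W D v w = false := by
  rw [knapsack_backtracking.eq_def, if_neg (not_lt.mpr hW), if_neg (not_lt.mpr hD)]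
  rcases h with rfl | rfl
  · cases w <;> rfl
  · cases v <;> rfl

lemma A_cons {W D v0 w0 : Int} (vt wt : List Int) (hW : 0 ≤ W) (hD : 0 ≤ D) :
    knapsack_backtracking W D (v0 :: vt) (w0 :: wt)
      = (knapsack_backtracking (W - w0) (D - v0) vt wt || knapsack_backtracking W D vt wt) := by
  rw [knapsack_backtracking.eq_def]
  simp [not_lt.mpr hW, not_lt.mpr hD]

-- the DFS over the zipped items computes the disjunction of A over the stack's states
lemma dfs_any (v w : List Int) (stack : List (Int × Int × Nat)) :
    pvDfs (w.zip v) stack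
      = stack.any (fun s => knapsack_backtracking s.1 s.2.1 (v.drop s.2.2) (w.drop s.2.2)) := by
  induction stack using pvDfs.induct (w.zip v) with
  | case1 => simp [pvDfs]
  | case2 a b i rest ha ih =>
      rw [pvDfs, if_pos ha, ih]
      simp [A_neg_W _ _ ha]
  | case3 a b i rest ha hb =>
      rw [pvDfs, if_neg ha, if_pos hb]
      simp only [List.any_cons]
      rw [A_true _ _ (not_lt.mp ha) hb, Bool.true_or]
  | case4 a b i rest ha hb hi ih =>
      rw [pvDfs, if_neg ha, if_neg hb, dif_pos hi, ih]
      have hiv : i < v.length := lt_of_lt_of_le hi (by rw [List.length_zip]; omega)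
      have hiw : i < w.length := lt_of_lt_of_le hi (by rw [List.length_zip]; omega)
      have hv : v.drop i = v[i] :: v.drop (i + 1) := (List.getElem_cons_drop hiv).symm
      have hw : w.drop i = w[i] :: w.drop (i + 1) := (List.getElem_cons_drop hiw).symm
      simp only [List.any_cons]
      rw [hv, hw, A_cons _ _ (not_lt.mp ha) (not_lt.mp hb), List.getElem_zip]
      simp [Bool.or_assoc]
  | case5 a b i rest ha hb hi ih =>
      rw [pvDfs, if_neg ha, if_neg hb, dif_neg hi, ih]
      have : v.drop i = [] ∨ w.drop i = [] := by
        rw [List.length_zip] at hi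
        by_cases hvw : v.length ≤ w.length
        · exact Or.inl (List.drop_eq_nil_of_le (by omega))
        · exact Or.inr (List.drop_eq_nil_of_le (by omega))
      simp [A_base (not_lt.mp ha) (not_lt.mp hb) this]

-- ===== VERDICT (by name: the statement is the Claim_ definition above) =====
theorem knapsack_backtracking_spec : Claim_equal_knapsack_backtracking := by
  intro W D v w _
  unfold Spec_knapsack_backtracking knapsack_backtracking_alt
  rw [dfs_any]
  simp
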